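-- pv_equiv track=rewrite | github.com/Holy-Emapian-Scripture/holy-emapian-scripture | 4 semestre/Projeção e Análise de Algoritmos/Exercises/Soluções em Python/ExListas/Lista3/lista_3_paa.py | problema_2
-- ===== SOURCE A (Python) =====
-- def problema_2(n: int, k: int, C1: int, C2: int, A: list[int]) -> int:
--     def decider (inicio_estrada, fim_estrada, idx_buraco_inicio, idx_buraco_fim, A_ord):
--         num_buracos = 0
--         if idx_buraco_fim >= idx_buraco_inicio:
--             num_buracos = (idx_buraco_fim - idx_buraco_inicio) + 1
--         comprimento_segmento = (fim_estrada - inicio_estrada) + 1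
--         custo_consertar = 0
--         if num_buracos == 0:
--             custo_consertar = C1
--         else:
--             custo_consertar = C2 * num_buracos * comprimento_segmento
--
--         if comprimento_segmento == 1:
--             return custo_consertar
--
--         ponto_meio_estrada = inicio_estrada + (comprimento_segmento // 2) - 1
--
--         low = idx_buraco_inicio
--         high = idx_buraco_fim
--         idx_ponto_divisao_buracos = idx_buraco_fim + 1
--
--         while low <= high:
--             mid = (low + high) // 2
--             if A_ord[mid] > ponto_meio_estrada:
--                 idx_ponto_divisao_buracos = mid
--                 high = mid - 1
--             else:
--                 low = mid + 1
--
--         custo_esquerda = decider (inicio_estrada,ponto_meio_estrada,idx_buraco_inicio,idx_ponto_divisao_buracos - 1, A_ord)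
--         custo_direita = decider (ponto_meio_estrada + 1,fim_estrada,idx_ponto_divisao_buracos,idx_buraco_fim,A_ord)
--         custo_dividir = custo_esquerda + custo_direita
--
--         return min(custo_consertar, custo_dividir)
--
--     if k == 0:
--         return C1
--     A = sorted(A)
--     L = 2**n
--     return decider (1, L, 0, k - 1, A)
-- ===== SOURCE B (Python) =====
-- def problema_2(n: int, k: int, C1: int, C2: int, A: list[int]) -> int:
--     # Bottom-up sparse tabulation over the perfect binary tree of 2^n dyadic segments
--     # (A recurses top-down with a binary search at every node); only segments that
--     # contain potholes are tabulated, pothole-free subtrees have the closed cost 'empty'.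
--     # Return value only; A is not mutated.
--     if k == 0:
--         return C1
--     L = 1 << n  # road length, a power of two
--     # sparse leaf level: ascending runs of (leaf index, pothole count); a pothole
--     # reported off the road is sunk to the nearest end segment
--     runs = []
--     for p in sorted(A)[:k]:
--         i = min(max(p, 1), L) - 1
--         if runs and runs[-1][0] == i:
--             runs[-1][1] += 1
--         else:
--             runs.append([i, 1])
--     nodes = [(i, c, C2 * c) for i, c in runs]
--     empty = C1  # cost of a pothole-free dyadic segment at the current level
--     seg = 1
--     for _ in range(n):
--         seg *= 2
--         new = []
--         idx = 0
--         while idx < len(nodes):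
--             i, c, cost = nodes[idx]
--             if idx + 1 < len(nodes) and nodes[idx + 1][0] // 2 == i // 2:
--                 c2, cost2 = nodes[idx + 1][1], nodes[idx + 1][2]
--                 new.append((i // 2, c + c2, min(C2 * (c + c2) * seg, cost + cost2)))
--                 idx += 2
--             else:
--                 new.append((i // 2, c, min(C2 * c * seg, cost + empty)))
--                 idx += 1
--         nodes = new
--         empty = min(C1, 2 * empty)
--     return nodes[0][2]
-- ===== Notes on version B (the rewrite author's own statement) =====
-- stated objective: alternative
-- what changed: Replaces A's top-down divide-and-conquer (which re-binary-searches the sorted pothole array at every node) by a bottom-up sparse dynamic-programming table: run-length-encode the sorted, clamped pothole positions into leaf nodes once, then merge sibling nodes level by level (a pothole-free sibling contributes the closed-form cost 'empty') until the root value remains.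
-- outside the precondition, e.g. on problema_2(1, -1, 5, 2, [1, 2]): A returns 5, B returns 4; on problema_2(0, 2, 5, 3, [1]): A returns 6, B returns 3
import Mathlib
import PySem

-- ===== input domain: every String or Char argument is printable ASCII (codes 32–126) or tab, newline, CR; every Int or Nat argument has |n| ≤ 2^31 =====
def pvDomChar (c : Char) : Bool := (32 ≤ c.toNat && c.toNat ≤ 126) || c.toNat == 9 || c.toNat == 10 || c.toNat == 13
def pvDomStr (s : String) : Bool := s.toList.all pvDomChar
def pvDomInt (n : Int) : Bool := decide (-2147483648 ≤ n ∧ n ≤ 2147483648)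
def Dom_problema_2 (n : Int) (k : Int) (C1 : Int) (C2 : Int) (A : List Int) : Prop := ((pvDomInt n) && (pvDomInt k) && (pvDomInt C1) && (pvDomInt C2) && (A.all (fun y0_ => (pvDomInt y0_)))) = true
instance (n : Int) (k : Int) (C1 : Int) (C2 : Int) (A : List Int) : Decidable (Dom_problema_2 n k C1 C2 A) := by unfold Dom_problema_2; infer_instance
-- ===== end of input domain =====

-- B replaces A's top-down divide-and-conquer (a binary search at every node) with one bottom-up
-- table over the 2^n unit segments, merged pairwise level by level; return value only (A only
-- rebinds its local A, no caller-visible mutation).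

-- ===== PORT A =====
-- A's inner while-loop (binary search); acc is idx_ponto_divisao_buracos.
-- A_ord[mid]: pyGet? with .getD 0 — under Pre_ every index reached is in range (Python raises otherwise).
def bsearchA (Aord : List Int) (ponto low high acc : Int) : Int :=
  if _h : low ≤ high then
    let mid := PySem.Int.floordiv (low + high) 2
    if (PySem.List.pyGet? Aord mid).getD 0 > ponto then
      bsearchA Aord ponto low (mid - 1) mid
    else
      bsearchA Aord ponto (mid + 1) high acc
  else acc
termination_by (high - low + 1).toNat
decreasing_by
  all_goals
    have h2 := PySem.Int.floordiv_two_mid_bounds _h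
    omega

-- A's recursive 'decider'; the fuel argument only makes Python's unbounded recursion total in
-- Lean (on Pre_ inputs the top-level fuel n.toNat + 1 is never exhausted).
def deciderA (C1 C2 : Int) (Aord : List Int) : Nat → Int → Int → Int → Int → Int
  | 0, _, _, _, _ => C1
  | fuel+1, inicio, fim, i0, i1 =>
    let num := if i1 ≥ i0 then i1 - i0 + 1 else 0
    let comp := fim - inicio + 1
    let custo := if num = 0 then C1 else C2 * num * comp
    if comp = 1 then custo
    else
      let ponto := inicio + PySem.Int.floordiv comp 2 - 1
      let p := bsearchA Aord ponto i0 i1 (i1 + 1)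
      min custo (deciderA C1 C2 Aord fuel inicio ponto i0 (p - 1) +
                 deciderA C1 C2 Aord fuel (ponto + 1) fim p i1)

def problema_2 (n : Int) (k : Int) (C1 : Int) (C2 : Int) (A : List Int) : Int :=
  if k = 0 then C1
  else
    let Aord := PySem.List.sorted A (fun x => x) false
    let L : Int := 2 ^ n.toNat          -- 2**n : exact for 0 ≤ n (Pre_; Python yields a float for n < 0)
    deciderA C1 C2 Aord (n.toNat + 1) 1 L 0 (k - 1)

-- ===== PORT B =====
-- one step of Source B's first for-loop on an already clamped leaf index i:
-- bump the last run or start a new one (runs[-1] = getLast?, in-place bump = dropLast ++ [..])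
def rleStep' (runs : List (Int × Int)) (i : Int) : List (Int × Int) :=
  match runs.getLast? with
  | some (j, c) => if j = i then runs.dropLast ++ [(i, c + 1)] else runs ++ [(i, 1)]
  | none => [(i, 1)]

-- Source B's loop body: clamp the reported position to the road, then extend the runs
def rleStep (L : Int) (runs : List (Int × Int)) (p : Int) : List (Int × Int) :=
  rleStep' runs (min (max p 1) L - 1)

-- Source B's inner while-loop: merge sibling nodes (same parent i // 2) of one level,
-- a missing sibling contributes the pothole-free cost 'emp'
def mergeS (C2 emp seg : Int) : List (Int × Int × Int) → List (Int × Int × Int)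
  | [] => []
  | [(i, c, cost)] => [(PySem.Int.floordiv i 2, c, min (C2 * c * seg) (cost + emp))]
  | (i, c, cost) :: (i2, c2, cost2) :: rest =>
    if PySem.Int.floordiv i2 2 = PySem.Int.floordiv i 2 then
      (PySem.Int.floordiv i 2, c + c2, min (C2 * (c + c2) * seg) (cost + cost2)) :: mergeS C2 emp seg rest
    else
      (PySem.Int.floordiv i 2, c, min (C2 * c * seg) (cost + emp)) :: mergeS C2 emp seg ((i2, c2, cost2) :: rest)
termination_by nodes => nodes.length
decreasing_by all_goals (simp only [List.length_cons]; omega)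

-- Source B's 'for _ in range(n)' loop, carrying (nodes, empty, seg)
def loopB (C1 C2 : Int) : Nat → List (Int × Int × Int) → Int → Int → List (Int × Int × Int)
  | 0, nodes, _, _ => nodes
  | t + 1, nodes, emp, seg =>
    loopB C1 C2 t (mergeS C2 emp (seg * 2) nodes) (min C1 (2 * emp)) (seg * 2)

def problema_2_alt (n : Int) (k : Int) (C1 : Int) (C2 : Int) (A : List Int) : Int :=
  if k = 0 then C1
  else
    let L : Int := 2 ^ n.toNat          -- 1 << n : exact for 0 ≤ n (Pre_; Python raises ValueError for n < 0)
    let holes := PySem.List.slice (PySem.List.sorted A (fun x => x) false) none (some k)   -- sorted(A)[:k]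
    let runs := holes.foldl (fun runs p => rleStep L runs p) []
    let nodes := runs.map (fun r => (r.1, r.2, C2 * r.2))
    ((loopB C1 C2 n.toNat nodes C1 1).headD (0, 0, 0)).2.2   -- nodes[0][2]; nonempty since k ≠ 0


-- ===== PRECONDITION & SPEC =====
-- Pre_ excludes only k and n outside the problem's natural domain: k is the number of potholes
-- listed in A, so 0 ≤ k ≤ len(A) (for k > len(A) A's binary search reads past the sorted list —
-- IndexError on most such inputs, phantom potholes on the rest; for k < 0 A silently prices the
-- road as pothole-free, a value outside the natural domain B does not reproduce); and, when
-- k ≠ 0 (both return C1 at once for k = 0), n ≥ 0: for n < 0 the road length 2**n is a Python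
-- float and A's recursion never bottoms out (RecursionError). All n ≥ 0 are admitted.
def Pre_problema_2 (n : Int) (k : Int) (C1 : Int) (C2 : Int) (A : List Int) : Prop :=
  0 ≤ k ∧ k ≤ A.length ∧ (k = 0 ∨ 0 ≤ n)
instance (n : Int) (k : Int) (C1 : Int) (C2 : Int) (A : List Int) : Decidable (Pre_problema_2 n k C1 C2 A) := by unfold Pre_problema_2; infer_instance

def pvWitness_problema_2 : Int × Int × Int × Int × List Int := (2, 3, 5, 2, [1, 7, 3])

def Spec_problema_2 (n : Int) (k : Int) (C1 : Int) (C2 : Int) (A : List Int) (out : Int) : Prop := out = problema_2_alt n k C1 C2 A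
instance (n : Int) (k : Int) (C1 : Int) (C2 : Int) (A : List Int) (out : Int) : Decidable (Spec_problema_2 n k C1 C2 A out) := by unfold Spec_problema_2; infer_instance

-- ===== CLAIM (what is proved, stated in full; the proofs are below) =====
def Claim_equal_problema_2 : Prop := ∀ (n : Int) (k : Int) (C1 : Int) (C2 : Int) (A : List Int), Dom_problema_2 n k C1 C2 A → Pre_problema_2 n k C1 C2 A → Spec_problema_2 n k C1 C2 A (problema_2 n k C1 C2 A)

-- ===== LEMMAS AND PROOFS =====


-- where a pothole reported at v lands on the road 1..L (off-road reports sink to the nearest end)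
def clampI (L v : Int) : Int := min (max v 1) L
-- how many of the (first k, sorted) potholes land on unit segment q
def cntP (L : Int) (hs : List Int) (q : Int) : Int := (hs.countP (fun v => clampI L v = q) : Int)
-- Σ_{i<len} f (a+i)
def ssum (f : Int → Int) (a : Int) (len : Nat) : Int := ((List.range len).map (fun i => f (a + (i : Int)))).sum
-- the common recursive specification: cost of the dyadic segment [a, a + 2^m - 1]
def Sfn (C1 C2 : Int) (f : Int → Int) : Nat → Int → Int
  | 0, a => if f a = 0 then C1 else C2 * f a * 1
  | m+1, a =>
    let num := ssum f a (2 ^ (m+1))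
    min (if num = 0 then C1 else C2 * num * ((2 : Int) ^ (m+1)))
        (Sfn C1 C2 f m a + Sfn C1 C2 f m (a + 2 ^ m))

-- xs[j] as the A port reads it
def pvVal (s : List Int) (j : Int) : Int := (PySem.List.pyGet? s j).getD 0

theorem pvVal_eq_getD (s : List Int) (j : Nat) : pvVal s (j : Int) = s.getD j 0 := by
  simp [pvVal, PySem.List.pyGet?_natCast]

theorem countP_disjoint (l : List Int) (p q : Int → Bool) (h : ∀ v, ¬(p v = true ∧ q v = true)) :
    l.countP p + l.countP q = l.countP (fun v => p v || q v) := by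
  induction l with
  | nil => simp
  | cons x t ih =>
    simp only [List.countP_cons]
    have := h x
    by_cases hp : p x <;> by_cases hq : q x <;> simp_all <;> omega

theorem ssum_succ (f : Int → Int) (a : Int) (len : Nat) :
    ssum f a (len + 1) = ssum f a len + f (a + len) := by
  simp [ssum, List.range_succ]

theorem ssum_split (f : Int → Int) (a : Int) (p q : Nat) :
    ssum f a (p + q) = ssum f a p + ssum f (a + p) q := by
  induction q with
  | zero => simp [ssum]
  | succ q ih =>
    rw [show p + (q + 1) = (p + q) + 1 by omega, ssum_succ, ssum_succ, ih]
    push_cast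
    rw [show a + ((p:Int) + q) = a + p + q by ring]
    ring

theorem countP_range_interval (i0 i1 : Int) (h0 : 0 ≤ i0) :
    ∀ (n : Nat) (Q : Nat → Bool),
    (∀ j, j < n → (Q j = true ↔ (i0 ≤ (j:Int) ∧ (j:Int) ≤ i1))) →
    ((List.range n).countP Q : Int) = max 0 (min i1 ((n:Int) - 1) - i0 + 1) := by
  intro n
  induction n with
  | zero => intro Q _; simp; omega
  | succ n ih =>
    intro Q hiff
    rw [List.range_succ, List.countP_append]
    have hn := ih Q (fun j hj => hiff j (by omega))
    have hQ := hiff n (by omega)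
    by_cases h : Q n = true
    · simp only [List.countP_cons, List.countP_nil, h]
      push_cast
      rw [hn]
      have := hQ.mp h
      omega
    · rw [Bool.not_eq_true] at h
      simp only [List.countP_cons, List.countP_nil, h]
      push_cast
      rw [hn]
      have : ¬ (i0 ≤ (n:Int) ∧ (n:Int) ≤ i1) := fun hc => by simp [hQ.mpr hc] at h
      omega

theorem ssum_cntP (L : Int) (hs : List Int) (a : Int) :
    ∀ (len : Nat),
    ssum (cntP L hs) a len
    = (hs.countP (fun v => decide (a ≤ clampI L v ∧ clampI L v ≤ a + len - 1)) : Int) := by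
  intro len
  induction len with
  | zero =>
    have h0 : List.countP (fun v => decide (a ≤ clampI L v ∧ clampI L v ≤ a + ((0:Nat):Int) - 1)) hs = 0 :=
      List.countP_eq_zero.mpr (fun v _ => by simp only [decide_eq_true_eq, Nat.cast_zero, not_and]; omega)
    rw [h0]
    simp [ssum]
  | succ len ih =>
    rw [ssum_succ, ih]
    have hone : cntP L hs (a + len) = (hs.countP (fun v => clampI L v = a + len) : Int) := rfl
    rw [hone, ← Nat.cast_add, countP_disjoint _ _ _ (by intro v; simp; omega)]
    congr 1
    apply List.countP_congr
    intro v _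
    by_cases hc : a ≤ clampI L v ∧ clampI L v ≤ a + ((len:Int) + 1) - 1
    · simp_all
      omega
    · simp_all
      omega

theorem countP_index (l : List Int) (P : Int → Bool) :
    l.countP P = (List.range l.length).countP (fun j => P (l.getD j 0)) := by
  induction l with
  | nil => simp
  | cons x t ih =>
    rw [List.countP_cons, List.length_cons, List.range_succ_eq_map, List.countP_cons]
    simp [List.countP_map, Function.comp_def, ih]

theorem num_eq (s : List Int) (kn : Nat) (L a b i0 i1 : Int)
    (hkn : kn ≤ s.length) (h0 : 0 ≤ i0) (h01 : i0 ≤ i1 + 1) (h1 : i1 < (kn : Int))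
    (Hlo : ∀ j : Int, 0 ≤ j → j < i0 → clampI L (pvVal s j) < a)
    (Hin : ∀ j : Int, i0 ≤ j → j ≤ i1 → a ≤ clampI L (pvVal s j) ∧ clampI L (pvVal s j) ≤ b)
    (Hhi : ∀ j : Int, i1 < j → j < (kn : Int) → b < clampI L (pvVal s j)) :
    ((s.take kn).countP (fun v => decide (a ≤ clampI L v ∧ clampI L v ≤ b)) : Int)
    = if i1 ≥ i0 then i1 - i0 + 1 else 0 := by
  have hlen : (s.take kn).length = kn := by simp [List.length_take]; omega
  rw [countP_index, hlen]
  have hgd : ∀ j : Nat, j < kn → (s.take kn).getD j 0 = pvVal s (j : Int) := by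
    intro j hj
    rw [pvVal_eq_getD]
    have hj2 : j < (s.take kn).length := by omega
    have hj3 : j < s.length := by omega
    rw [List.getD_eq_getElem _ _ hj2, List.getD_eq_getElem _ _ hj3, List.getElem_take]
  rw [countP_range_interval i0 i1 h0 kn _ ?_]
  · omega
  · intro j hj
    rw [hgd j hj]
    constructor
    · intro hq
      simp only [decide_eq_true_eq] at hq
      constructor
      · by_contra hc
        have := Hlo j (by omega) (by omega)
        omega
      · by_contra hc
        have := Hhi j (by omega) (by omega)
        omega
    · intro hq
      simp only [decide_eq_true_eq]
      exact Hin j hq.1 hq.2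

theorem bsearchA_spec (s : List Int) (ponto : Int)
    (hmono : ∀ i j : Int, 0 ≤ i → i ≤ j → j < (s.length : Int) → pvVal s i ≤ pvVal s j) :
    ∀ (low high : Int), 0 ≤ low → high < (s.length : Int) →
    (low ≤ high + 1 → low ≤ bsearchA s ponto low high (high + 1)) ∧
    bsearchA s ponto low high (high + 1) ≤ high + 1 ∧
    (∀ j, low ≤ j → j < bsearchA s ponto low high (high + 1) → pvVal s j ≤ ponto) ∧
    (∀ j, bsearchA s ponto low high (high + 1) ≤ j → j ≤ high → ponto < pvVal s j) := by
  suffices H : ∀ (Mn : Nat) (low high : Int), (high - low + 1).toNat ≤ Mn → 0 ≤ low → high < (s.length : Int) →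
      (low ≤ high + 1 → low ≤ bsearchA s ponto low high (high + 1)) ∧
      bsearchA s ponto low high (high + 1) ≤ high + 1 ∧
      (∀ j, low ≤ j → j < bsearchA s ponto low high (high + 1) → pvVal s j ≤ ponto) ∧
      (∀ j, bsearchA s ponto low high (high + 1) ≤ j → j ≤ high → ponto < pvVal s j) by
    exact fun low high h0 hl => H (high - low + 1).toNat low high le_rfl h0 hl
  intro Mn
  induction Mn with
  | zero =>
    intro low high hm h0 hl
    have hnl : ¬ low ≤ high := by omega
    rw [bsearchA, dif_neg hnl]
    refine ⟨fun _ => by omega, le_rfl, ?_, ?_⟩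
    · intro j hj1 hj2; exact ((by omega : False)).elim
    · intro j hj1 hj2; exact ((by omega : False)).elim
  | succ Mn ih =>
    intro low high hm h0 hl
    rw [bsearchA]
    by_cases hlh : low ≤ high
    · rw [dif_pos hlh]
      have hmid := PySem.Int.floordiv_two_mid_bounds hlh
      set mid := PySem.Int.floordiv (low + high) 2 with hmiddef
      by_cases hv : (PySem.List.pyGet? s mid).getD 0 > ponto
      · rw [if_pos hv]
        have hg : bsearchA s ponto low (mid - 1) mid = bsearchA s ponto low (mid - 1) ((mid - 1) + 1) := by
          rw [show (mid - 1) + 1 = mid by ring]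
        rw [hg]
        obtain ⟨ha, hb, hc, hd⟩ := ih low (mid - 1) (by omega) h0 (by omega)
        refine ⟨fun _ => ha (by omega), by omega, hc, ?_⟩
        intro j hj1 hj2
        by_cases hj : j ≤ mid - 1
        · exact hd j hj1 hj
        · exact lt_of_lt_of_le hv (hmono mid j (by omega) (by omega) (by omega))
      · rw [if_neg hv]
        obtain ⟨ha, hb, hc, hd⟩ := ih (mid + 1) high (by omega) (by omega) hl
        refine ⟨fun _ => by have := ha (by omega); omega, hb, ?_, hd⟩
        intro j hj1 hj2
        by_cases hj : mid + 1 ≤ j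
        · exact hc j hj hj2
        · exact le_trans (hmono j mid (by omega) (by omega) (by omega)) (not_lt.mp hv)
    · rw [dif_neg hlh]
      refine ⟨fun _ => by omega, le_rfl, ?_, ?_⟩
      · intro j hj1 hj2; exact ((by omega : False)).elim
      · intro j hj1 hj2; exact ((by omega : False)).elim

theorem deciderA_eq_Sfn (C1 C2 : Int) (s : List Int) (kn : Nat) (L : Int)
    (hkn : kn ≤ s.length)
    (hmono : ∀ i j : Int, 0 ≤ i → i ≤ j → j < (s.length : Int) → pvVal s i ≤ pvVal s j) :
    ∀ (m fuel : Nat) (a i0 i1 : Int), m < fuel →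
    1 ≤ a → a + 2^m - 1 ≤ L → 0 ≤ i0 → i0 ≤ i1 + 1 → i1 < (kn : Int) →
    (∀ j : Int, 0 ≤ j → j < i0 → clampI L (pvVal s j) < a) →
    (∀ j : Int, i0 ≤ j → j ≤ i1 →
        a ≤ clampI L (pvVal s j) ∧ clampI L (pvVal s j) ≤ a + 2^m - 1) →
    (∀ j : Int, i1 < j → j < (kn : Int) → a + 2^m - 1 < clampI L (pvVal s j)) →
    deciderA C1 C2 s fuel a (a + 2^m - 1) i0 i1 = Sfn C1 C2 (cntP L (s.take kn)) m a := by
  intro m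
  induction m with
  | zero =>
    intro fuel a i0 i1 hfuel ha hb h0 h01 h1 Hlo Hin Hhi
    obtain ⟨fuel', rfl⟩ : ∃ f', fuel = f' + 1 := ⟨fuel - 1, by omega⟩
    have hnum := num_eq s kn L a (a + 2^0 - 1) i0 i1 hkn h0 h01 h1 Hlo Hin Hhi
    simp only [deciderA]
    rw [if_pos (by ring : (a + 2^0 - 1) - a + 1 = 1)]
    rw [Sfn]
    unfold cntP
    have hcong : (List.countP (fun v => decide (clampI L v = a)) (s.take kn))
        = (List.countP (fun v => decide (a ≤ clampI L v ∧ clampI L v ≤ a + 2^0 - 1)) (s.take kn)) :=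
      List.countP_congr (fun v _ => by simp only [decide_eq_true_eq]; omega)
    rw [hcong, hnum]
    have h1' : (a + 2^0 - 1) - a + 1 = (1:Int) := by ring
    rw [h1']
  | succ m ih =>
    intro fuel a i0 i1 hfuel ha hb h0 h01 h1 Hlo Hin Hhi
    obtain ⟨fuel', rfl⟩ : ∃ f', fuel = f' + 1 := ⟨fuel - 1, by omega⟩
    have hp2 : (0:Int) < 2^m := by positivity
    have hp2' : ((2:Int)^(m+1)) = 2 * 2^m := by ring
    have hnum := num_eq s kn L a (a + 2^(m+1) - 1) i0 i1 hkn h0 h01 h1 Hlo Hin Hhi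
    simp only [deciderA]
    rw [if_neg (by omega : ¬ ((a + 2^(m+1) - 1) - a + 1 = 1))]
    have hcomp : (a + 2^(m+1) - 1) - a + 1 = (2:Int)^(m+1) := by ring
    rw [hcomp]
    have hfd : PySem.Int.floordiv ((2:Int)^(m+1)) 2 = 2^m := by
      rw [PySem.Int.floordiv_eq_ediv_of_pos (by omega), hp2', Int.mul_ediv_cancel_left _ (by omega)]
    rw [hfd]
    set ponto := a + 2^m - 1 with hponto
    obtain ⟨hpa, hpb, hclow, hchigh⟩ := bsearchA_spec s ponto hmono i0 i1 h0
      (by exact_mod_cast lt_of_lt_of_le h1 (by exact_mod_cast hkn))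
    set p := bsearchA s ponto i0 i1 (i1 + 1) with hp
    have hpa' : i0 ≤ p := hpa h01
    have hLp : ponto < L := by omega
    have hcle : ∀ j : Int, i0 ≤ j → j < p → clampI L (pvVal s j) ≤ ponto := by
      intro j hj1 hj2
      have := hclow j hj1 hj2
      simp only [clampI]
      omega
    have hcgt : ∀ j : Int, p ≤ j → j ≤ i1 → ponto < clampI L (pvVal s j) := by
      intro j hj1 hj2
      have := hchigh j hj1 hj2
      simp only [clampI]
      omega
    have hL1 : deciderA C1 C2 s fuel' a ponto i0 (p - 1)
        = Sfn C1 C2 (cntP L (s.take kn)) m a := by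
      have := ih fuel' a i0 (p - 1) (by omega) ha (by omega) h0 (by omega) (by omega)
        Hlo
        (fun j hj1 hj2 => ⟨(Hin j hj1 (by omega)).1, hcle j hj1 (by omega)⟩)
        (fun j hj1 hj2 => by
          by_cases hji : j ≤ i1
          · exact hcgt j (by omega) hji
          · have := Hhi j (by omega) hj2; omega)
      rw [show a + 2^m - 1 = ponto from rfl] at this
      exact this
    have hL2 : deciderA C1 C2 s fuel' (ponto + 1) (a + 2^(m+1) - 1) p i1
        = Sfn C1 C2 (cntP L (s.take kn)) m (a + 2^m) := by
      rw [show ponto + 1 = a + 2^m by omega,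
          show a + 2^(m+1) - 1 = (a + 2^m) + 2^m - 1 by ring]
      exact ih fuel' (a + 2^m) p i1 (by omega) (by omega) (by omega) (by omega) (by omega) h1
        (fun j hj1 hj2 => by
          by_cases hji : j < i0
          · have := Hlo j hj1 hji; omega
          · have := hcle j (by omega) (by omega); omega)
        (fun j hj1 hj2 => ⟨by have := hcgt j hj1 hj2; omega,
          by have := (Hin j (by omega) hj2).2; omega⟩)
        (fun j hj1 hj2 => by have := Hhi j hj1 hj2; omega)
    rw [hL1, hL2]
    rw [Sfn]
    unfold cntP
    rw [show ssum (fun q => ((List.countP (fun v => decide (clampI L v = q)) (s.take kn) : Nat) : Int)) a (2^(m+1))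
        = ((s.take kn).countP (fun v => decide (a ≤ clampI L v ∧ clampI L v ≤ a + ((2^(m+1) : Nat) : Int) - 1)) : Int) from ssum_cntP L (s.take kn) a (2^(m+1))]
    rw [show ((((2:Nat)^(m+1)) : Nat) : Int) = (2:Int)^(m+1) by push_cast; ring]
    rw [hnum]

-- ===== B-SIDE LEMMAS =====

-- cost of a pothole-free dyadic segment of 2^t unit segments (Source B's 'empty')
def Et (C1 : Int) : Nat → Int
  | 0 => C1
  | t + 1 => min C1 (2 * Et C1 t)

-- canonical sparse level t: nodes o, o+1, …, o+q-1 that contain potholes, with their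
-- pothole count and Sfn cost (node j covers road positions 1 + j*2^t … 1 + (j+1)*2^t - 1)
def lvl (C1 C2 : Int) (f : Int → Int) (t : Nat) : Nat → Nat → List (Int × Int × Int)
  | _, 0 => []
  | o, q + 1 =>
    (if ssum f (1 + (o : Int) * 2 ^ t) (2 ^ t) = 0 then []
     else [((o : Int), ssum f (1 + (o : Int) * 2 ^ t) (2 ^ t), Sfn C1 C2 f t (1 + (o : Int) * 2 ^ t))])
    ++ lvl C1 C2 f t (o + 1) q

-- canonical run-length list over counts g
def rleL (g : Nat → Nat) : Nat → Nat → List (Int × Int)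
  | _, 0 => []
  | o, q + 1 =>
    (if g o = 0 then [] else [((o : Int), (g o : Int))]) ++ rleL g (o + 1) q

theorem ssum_one' (f : Int → Int) (a : Int) : ssum f a 1 = f a := by
  simp [ssum]

theorem ssum_nonneg (f : Int → Int) (hf : ∀ j, 0 ≤ f j) (a : Int) :
    ∀ len, 0 ≤ ssum f a len := by
  intro len
  induction len with
  | zero => simp [ssum]
  | succ len ih => rw [ssum_succ]; have := hf (a + len); omega

theorem Sfn_zero (C1 C2 : Int) (f : Int → Int) (hf : ∀ j, 0 ≤ f j) :
    ∀ (t : Nat) (a : Int), ssum f a (2 ^ t) = 0 → Sfn C1 C2 f t a = Et C1 t := by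
  intro t
  induction t with
  | zero =>
    intro a h0
    rw [pow_zero, ssum_one'] at h0
    simp [Sfn, Et, h0]
  | succ t ih =>
    intro a h0
    have hsp : ssum f a (2 ^ (t + 1)) = ssum f a (2 ^ t) + ssum f (a + 2 ^ t) (2 ^ t) := by
      rw [show (2:Nat) ^ (t+1) = 2 ^ t + 2 ^ t by ring, ssum_split]
      have e2 : a + ((2 ^ t : Nat) : Int) = a + 2 ^ t := by push_cast; ring
      rw [e2]
    have h1 := ssum_nonneg f hf a (2 ^ t)
    have h2 := ssum_nonneg f hf (a + 2 ^ t) (2 ^ t)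
    have h0' := h0
    rw [hsp] at h0'
    rw [Sfn, ih a (by omega), ih (a + 2 ^ t) (by omega), if_pos h0,
        show Et C1 t + Et C1 t = 2 * Et C1 t by ring]
    rfl

-- every node index of lvl … o q is at least o
theorem lvl_le (C1 C2 : Int) (f : Int → Int) (t : Nat) :
    ∀ (q o : Nat) (e : Int × Int × Int), e ∈ lvl C1 C2 f t o q → (o : Int) ≤ e.1 := by
  intro q
  induction q with
  | zero =>
    intro o e he
    rw [lvl] at he
    exact absurd he (List.not_mem_nil)
  | succ q ih =>
    intro o e he
    rw [lvl, List.mem_append] at he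
    rcases he with he | he
    · split at he <;> simp_all
    · have := ih (o + 1) e he
      push_cast at this
      omega

theorem fd_two_mul (o : Int) : PySem.Int.floordiv (2 * o) 2 = o := by
  rw [PySem.Int.floordiv_eq_ediv_of_pos (by omega)]
  omega

theorem fd_two_mul_add_one (o : Int) : PySem.Int.floordiv (2 * o + 1) 2 = o := by
  rw [PySem.Int.floordiv_eq_ediv_of_pos (by omega)]
  omega

theorem fd_ge (x o : Int) (h : 2 * o + 2 ≤ x) : ¬ PySem.Int.floordiv x 2 = o := by
  rw [PySem.Int.floordiv_eq_ediv_of_pos (by omega)]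
  omega

-- mergeS on a head with no present sibling
theorem mergeS_skip (C2 emp seg : Int) (i c cost : Int) (rest : List (Int × Int × Int))
    (h : ∀ e ∈ rest.head?, ¬ PySem.Int.floordiv e.1 2 = PySem.Int.floordiv i 2) :
    mergeS C2 emp seg ((i, c, cost) :: rest)
    = (PySem.Int.floordiv i 2, c, min (C2 * c * seg) (cost + emp)) :: mergeS C2 emp seg rest := by
  match rest with
  | [] => simp [mergeS]
  | (i2, c2, cost2) :: rest' =>
    have hne := h (i2, c2, cost2) (by simp)
    simp only [mergeS, if_neg hne]

theorem mergeS_pair (C2 emp seg : Int) (i c cost i2 c2 cost2 : Int) (rest : List (Int × Int × Int))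
    (h : PySem.Int.floordiv i2 2 = PySem.Int.floordiv i 2) :
    mergeS C2 emp seg ((i, c, cost) :: (i2, c2, cost2) :: rest)
    = (PySem.Int.floordiv i 2, c + c2, min (C2 * (c + c2) * seg) (cost + cost2))
      :: mergeS C2 emp seg rest := by
  simp only [mergeS, if_pos h]

theorem sP_split (f : Int → Int) (t : Nat) (o : Int) :
    ssum f (1 + o * 2 ^ (t + 1)) (2 ^ (t + 1))
    = ssum f (1 + 2 * o * 2 ^ t) (2 ^ t) + ssum f (1 + (2 * o + 1) * 2 ^ t) (2 ^ t) := by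
  rw [show (2:Nat) ^ (t+1) = 2 ^ t + 2 ^ t by ring, ssum_split]
  have e1 : 1 + o * (2:Int) ^ (t + 1) = 1 + 2 * o * 2 ^ t := by ring
  have e2 : 1 + o * (2:Int) ^ (t + 1) + ((2 ^ t : Nat) : Int) = 1 + (2 * o + 1) * 2 ^ t := by
    push_cast
    ring
  rw [e2, e1]

theorem mergeS_lvl (C1 C2 : Int) (f : Int → Int) (hf : ∀ j, 0 ≤ f j) (t : Nat) :
    ∀ (q o : Nat),
    mergeS C2 (Et C1 t) ((2 : Int) ^ (t + 1)) (lvl C1 C2 f t (2 * o) (2 * q))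
    = lvl C1 C2 f (t + 1) o q := by
  intro q
  induction q with
  | zero => intro o; rw [show 2 * 0 = 0 by omega]; rw [lvl, lvl]; simp [mergeS]
  | succ q ih =>
    intro o
    -- unfold the two child blocks
    have hunf : lvl C1 C2 f t (2 * o) (2 * (q + 1))
        = (if ssum f (1 + 2 * (o:Int) * 2 ^ t) (2 ^ t) = 0 then []
           else [(2 * (o:Int), ssum f (1 + 2 * (o:Int) * 2 ^ t) (2 ^ t),
                  Sfn C1 C2 f t (1 + 2 * (o:Int) * 2 ^ t))])
          ++ ((if ssum f (1 + (2 * (o:Int) + 1) * 2 ^ t) (2 ^ t) = 0 then []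
           else [(2 * (o:Int) + 1, ssum f (1 + (2 * (o:Int) + 1) * 2 ^ t) (2 ^ t),
                  Sfn C1 C2 f t (1 + (2 * (o:Int) + 1) * 2 ^ t))])
          ++ lvl C1 C2 f t (2 * (o + 1)) (2 * q)) := by
      rw [show 2 * (q + 1) = (2 * q + 1) + 1 by omega, lvl, lvl,
          show 2 * o + 1 + 1 = 2 * (o + 1) by omega]
      push_cast
      rfl
    rw [hunf]
    set sL := ssum f (1 + 2 * (o:Int) * 2 ^ t) (2 ^ t) with hsL
    set sR := ssum f (1 + (2 * (o:Int) + 1) * 2 ^ t) (2 ^ t) with hsR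
    have hL0 : 0 ≤ sL := ssum_nonneg f hf _ _
    have hR0 : 0 ≤ sR := ssum_nonneg f hf _ _
    have hrest_le : ∀ e ∈ (lvl C1 C2 f t (2 * (o + 1)) (2 * q)).head?,
        2 * (o:Int) + 2 ≤ e.1 := by
      intro e he
      have hmem : e ∈ lvl C1 C2 f t (2 * (o + 1)) (2 * q) := List.mem_of_mem_head? he
      have := lvl_le C1 C2 f t (2 * q) (2 * (o + 1)) e hmem
      push_cast at this
      omega
    -- the parent block
    have hparent : lvl C1 C2 f (t + 1) o (q + 1)
        = (if ssum f (1 + (o:Int) * 2 ^ (t + 1)) (2 ^ (t + 1)) = 0 then []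
           else [((o:Int), ssum f (1 + (o:Int) * 2 ^ (t + 1)) (2 ^ (t + 1)),
                  Sfn C1 C2 f (t + 1) (1 + (o:Int) * 2 ^ (t + 1)))])
          ++ lvl C1 C2 f (t + 1) (o + 1) q := by
      rw [lvl]
    have hsP : ssum f (1 + (o:Int) * 2 ^ (t + 1)) (2 ^ (t + 1)) = sL + sR := sP_split f t o
    have hSfnP : Sfn C1 C2 f (t + 1) (1 + (o:Int) * 2 ^ (t + 1))
        = min (if sL + sR = 0 then C1 else C2 * (sL + sR) * ((2:Int) ^ (t + 1)))
              (Sfn C1 C2 f t (1 + 2 * (o:Int) * 2 ^ t) + Sfn C1 C2 f t (1 + (2 * (o:Int) + 1) * 2 ^ t)) := by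
      rw [Sfn, hsP]
      congr 2
      · ring
      · congr 1
        push_cast [pow_succ]
        ring
    by_cases hL : sL = 0 <;> by_cases hR : sR = 0
    · -- both children empty: nothing at the parent either
      rw [if_pos hL, if_pos hR, List.nil_append, List.nil_append, ih (o + 1), hparent,
          if_pos (by rw [hsP]; omega), List.nil_append]
    · -- only the right child is present
      rw [if_pos hL, if_neg hR]
      simp only [List.cons_append, List.nil_append]
      rw [mergeS_skip _ _ _ _ _ _ _ (fun e he => by
            rw [fd_two_mul_add_one]
            exact fd_ge e.1 (o : Int) (hrest_le e he)),
          ih (o + 1), hparent, if_neg (by rw [hsP]; omega), fd_two_mul_add_one, hsP, hSfnP,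
          if_neg (by omega), Sfn_zero C1 C2 f hf t _ hL, hL, zero_add, add_comm (Et C1 t)]
      rfl
    · -- only the left child is present
      rw [if_neg hL, if_pos hR]
      simp only [List.cons_append, List.nil_append]
      rw [mergeS_skip _ _ _ _ _ _ _ (fun e he => by
            rw [fd_two_mul]
            exact fd_ge e.1 (o : Int) (hrest_le e he)),
          ih (o + 1), hparent, if_neg (by rw [hsP]; omega), fd_two_mul, hsP, hSfnP,
          if_neg (by omega), Sfn_zero C1 C2 f hf t _ hR, hR, add_zero]
      rfl
    · -- both children present: the pair branch of mergeS
      rw [if_neg hL, if_neg hR]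
      simp only [List.cons_append, List.nil_append]
      rw [mergeS_pair _ _ _ _ _ _ _ _ _ _ (by rw [fd_two_mul, fd_two_mul_add_one]),
          ih (o + 1), hparent, if_neg (by rw [hsP]; omega), fd_two_mul, hsP, hSfnP,
          if_neg (by omega)]
      rfl

theorem loopB_lvl (C1 C2 : Int) (f : Int → Int) (hf : ∀ j, 0 ≤ f j) :
    ∀ (u t : Nat),
    loopB C1 C2 u (lvl C1 C2 f t 0 (2 ^ u)) (Et C1 t) ((2 : Int) ^ t)
    = lvl C1 C2 f (t + u) 0 1 := by
  intro u
  induction u with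
  | zero => intro t; rw [pow_zero, loopB, Nat.add_zero]
  | succ u ih =>
    intro t
    rw [loopB]
    have h1 : (2 : Int) ^ t * 2 = (2 : Int) ^ (t + 1) := by ring
    have h2 : min C1 (2 * Et C1 t) = Et C1 (t + 1) := rfl
    have h3 : (2 : Nat) ^ (u + 1) = 2 * 2 ^ u := by ring
    rw [h1, h2, h3, show (0 : Nat) = 2 * 0 by omega,
        mergeS_lvl C1 C2 f hf t (2 ^ u) 0, ih (t + 1),
        show t + 1 + u = t + (u + 1) by omega]

-- folding m extra copies of o onto a single run (o, v)
theorem rle_run (o v : Int) :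
    ∀ m : Nat, List.foldl rleStep' [(o, v)] (List.replicate m o) = [(o, v + m)] := by
  intro m
  induction m generalizing v with
  | zero => simp
  | succ m ih =>
    rw [show m + 1 = 1 + m by omega, List.replicate_add, List.replicate_one,
        List.foldl_append, List.foldl_cons, List.foldl_nil]
    have : rleStep' [(o, v)] o = [(o, v + 1)] := by
      simp [rleStep']
    rw [this, ih (v + 1)]
    congr 2
    push_cast
    ring

-- a nonempty accumulator tail screens the prefix from rleStep'
theorem rle_shift (pre : List (Int × Int)) :
    ∀ (ys : List Int) (acc : List (Int × Int)), acc ≠ [] →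
    List.foldl rleStep' (pre ++ acc) ys = pre ++ List.foldl rleStep' acc ys := by
  intro ys
  induction ys with
  | nil => intro acc _; simp
  | cons y t ih =>
    intro acc hne
    rw [List.foldl_cons, List.foldl_cons]
    have hlast : (pre ++ acc).getLast? = acc.getLast? := List.getLast?_append_of_ne_nil pre hne
    obtain ⟨jc, hjc⟩ : ∃ jc, acc.getLast? = some jc :=
      Option.isSome_iff_exists.mp (by simpa [List.getLast?_isSome] using hne)
    obtain ⟨j, c⟩ := jc
    by_cases hjy : j = y
    · have e1 : rleStep' (pre ++ acc) y = pre ++ (acc.dropLast ++ [(y, c + 1)]) := by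
        rw [rleStep', hlast, hjc]
        simp only [if_pos hjy]
        rw [List.dropLast_append_of_ne_nil hne, List.append_assoc]
      have e2 : rleStep' acc y = acc.dropLast ++ [(y, c + 1)] := by
        rw [rleStep', hjc]
        simp [hjy]
      rw [e1, e2, ih _ (by simp)]
    · have e1 : rleStep' (pre ++ acc) y = pre ++ (acc ++ [(y, 1)]) := by
        rw [rleStep', hlast, hjc]
        simp only [if_neg hjy]
        rw [List.append_assoc]
      have e2 : rleStep' acc y = acc ++ [(y, 1)] := by
        rw [rleStep', hjc]
        simp [hjy]
      rw [e1, e2, ih _ (by simp)]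

theorem rleL_congr (g g' : Nat → Nat) :
    ∀ (q o : Nat), (∀ r, r < q → g (o + r) = g' (o + r)) → rleL g o q = rleL g' o q := by
  intro q
  induction q with
  | zero => intro o _; rfl
  | succ q ih =>
    intro o h
    rw [rleL, rleL]
    have h0 : g o = g' o := by have := h 0 (by omega); simpa using this
    have hrec : rleL g (o + 1) q = rleL g' (o + 1) q := by
      apply ih (o + 1)
      intro r hr
      have := h (r + 1) (by omega)
      rw [show o + 1 + r = o + (r + 1) by omega]
      exact this
    rw [h0, hrec]

-- run-length encoding of a sorted list with values in [o, o+q) is the canonical count list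
theorem rle_spec :
    ∀ (q o : Nat) (ys : List Int), ys.Pairwise (· ≤ ·) →
    (∀ y ∈ ys, (o : Int) ≤ y ∧ y < (o : Int) + q) →
    List.foldl rleStep' [] ys = rleL (fun j => ys.countP (fun y => y = (j : Int))) o q := by
  intro q
  induction q with
  | zero =>
    intro o ys _ hb
    match ys with
    | [] => rfl
    | y :: t =>
      have := hb y (by simp)
      simp at this
      omega
  | succ q ih =>
    intro o ys hsort hb
    set p : Int → Bool := fun y => y = (o : Int) with hp
    have hsplit : ys = ys.takeWhile p ++ ys.dropWhile p := (List.takeWhile_append_dropWhile).symm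
    set ys0 := ys.takeWhile p with hys0
    set ys1 := ys.dropWhile p with hys1
    have hys0all : ∀ y ∈ ys0, y = (o : Int) := by
      intro y hy
      have := List.mem_takeWhile_imp hy
      simpa [hp] using this
    have hys0rep : ys0 = List.replicate ys0.length ((o : Int)) :=
      List.eq_replicate_of_mem hys0all
    have hys1sort : ys1.Pairwise (· ≤ ·) := List.Pairwise.sublist (List.dropWhile_sublist _) hsort
    have hys1mem : ∀ y ∈ ys1, y ∈ ys := fun y hy => (List.dropWhile_sublist _).mem hy
    have hys1gt : ∀ y ∈ ys1, (o : Int) < y := by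
      intro y hy
      cases h1 : ys1 with
      | nil => rw [h1] at hy; exact absurd hy (List.not_mem_nil)
      | cons z zs =>
        rw [h1] at hy
        have hz : p z = false := by
          have h := List.head?_dropWhile_not p ys
          rw [← hys1, h1] at h
          simpa using h
        have hzo : (o : Int) < z := by
          have hzys : z ∈ ys := hys1mem z (by simp [h1])
          have hb1 := (hb z hzys).1
          simp only [hp, decide_eq_false_iff_not] at hz
          omega
        rcases List.mem_cons.mp hy with rfl | hmem
        · exact hzo
        · have hps : (z :: zs).Pairwise (· ≤ ·) := h1 ▸ hys1sort
          have := (List.pairwise_cons.mp hps).1 y hmem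
          omega
    have hcnt1 : ys1.countP (fun y => y = (o : Int)) = 0 :=
      List.countP_eq_zero.mpr (fun y hy => by
        have := hys1gt y hy
        simp
        omega)
    have hcnt : ys.countP (fun y => y = (o : Int)) = ys0.length := by
      conv_lhs => rw [hsplit]
      rw [List.countP_append, hcnt1]
      have : ys0.countP (fun y => y = (o : Int)) = ys0.length :=
        List.countP_eq_length.mpr (fun y hy => by simp [hys0all y hy])
      omega
    have hbound1 : ∀ y ∈ ys1, ((o + 1 : Nat) : Int) ≤ y ∧ y < ((o + 1 : Nat) : Int) + q := by
      intro y hy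
      have h1 := hys1gt y hy
      have h2 := (hb y (hys1mem y hy)).2
      push_cast
      push_cast at h2
      omega
    have hih := ih (o + 1) ys1 hys1sort hbound1
    have hcongr : rleL (fun j => ys1.countP (fun y => y = (j : Int))) (o + 1) q
        = rleL (fun j => ys.countP (fun y => y = (j : Int))) (o + 1) q := by
      apply rleL_congr
      intro r _
      conv_rhs => rw [hsplit]
      rw [List.countP_append]
      have : ys0.countP (fun y => y = ((o + 1 + r : Nat) : Int)) = 0 :=
        List.countP_eq_zero.mpr (fun y hy => by
          have := hys0all y hy
          push_cast
          simp
          omega)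
      omega
    match h0 : ys0.length with
    | 0 =>
      have hys0nil : ys0 = [] := List.eq_nil_of_length_eq_zero h0
      have : ys = ys1 := by rw [hsplit, hys0nil, List.nil_append]
      rw [rleL, hcnt, h0, if_pos rfl, List.nil_append, ← hcongr, ← hih, this]
    | m + 1 =>
      -- ys starts with m+1 copies of o
      have hfold0 : List.foldl rleStep' [] ys
          = List.foldl rleStep' [((o : Int), ((m + 1 : Nat) : Int))] ys1 := by
        conv_lhs => rw [hsplit]
        rw [List.foldl_append, hys0rep, h0, List.replicate_succ, List.foldl_cons,
            show rleStep' [] ((o : Int)) = [((o : Int), 1)] from by simp [rleStep'],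
            rle_run, show ((m + 1 : Nat) : Int) = 1 + (m : Int) by push_cast; ring]
      rw [hfold0, rleL, hcnt, h0, if_neg (by omega), ← hcongr, ← hih]
      match h1 : ys1 with
      | [] => simp
      | z :: zs =>
        have hzo : ¬ ((o : Int) = z) := by
          have := hys1gt z (by simp [h1])
          omega
        have e1 : rleStep' [((o : Int), ((m + 1 : Nat) : Int))] z
            = [((o : Int), ((m + 1 : Nat) : Int))] ++ [(z, 1)] := by
          simp [rleStep', hzo]
        have e2 : rleStep' [] z = [(z, 1)] := by simp [rleStep']
        rw [List.foldl_cons, e1, rle_shift _ zs [(z, 1)] (by simp), List.foldl_cons, e2]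

-- the canonical run list, costed, is the canonical leaf level
theorem rleL_map_lvl (C1 C2 : Int) (f : Int → Int) (g : Nat → Nat)
    (hg : ∀ j : Nat, f (1 + (j : Int)) = (g j : Int)) :
    ∀ (q o : Nat),
    (rleL g o q).map (fun r => (r.1, r.2, C2 * r.2)) = lvl C1 C2 f 0 o q := by
  intro q
  induction q with
  | zero => intro o; rfl
  | succ q ih =>
    intro o
    rw [rleL, lvl, List.map_append, ih (o + 1)]
    congr 1
    simp only [pow_zero, mul_one]
    rw [ssum_one', hg o]
    by_cases h : g o = 0
    · simp [h]
    · simp [h, Sfn, hg o]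

theorem mono_of_pairwise (s : List Int) (hp : List.Pairwise (· ≤ ·) s) :
    ∀ i j : Int, 0 ≤ i → i ≤ j → j < (s.length : Int) → pvVal s i ≤ pvVal s j := by
  intro i j hi hij hj
  rcases eq_or_lt_of_le hij with rfl | hlt
  · exact le_rfl
  · have hi' : i = ((i.toNat : Nat) : Int) := by omega
    have hj' : j = ((j.toNat : Nat) : Int) := by omega
    rw [hi', hj', pvVal_eq_getD, pvVal_eq_getD]
    have h2 : j.toNat < s.length := by omega
    rw [List.getD_eq_getElem _ _ (by omega), List.getD_eq_getElem _ _ h2]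
    exact List.pairwise_iff_getElem.mp hp i.toNat j.toNat (by omega) h2 (by omega)

-- ===== VERDICT (by name: the statement is the Claim_ definition above) =====
theorem problema_2_spec : Claim_equal_problema_2 := by
  unfold Claim_equal_problema_2
  intro n k C1 C2 A _hdom hpre
  obtain ⟨hk0, hklen, hkn0⟩ := hpre
  unfold Spec_problema_2
  by_cases hk : k = 0
  · simp [problema_2, problema_2_alt, hk]
  · have hn0 : 0 ≤ n := hkn0.resolve_left hk
    have hN2 : (0:Int) < 2 ^ n.toNat := by positivity
    have hslen : (PySem.List.sorted A (fun x => x) false).length = A.length :=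
      PySem.List.length_sorted A (fun x => x) false
    set s := PySem.List.sorted A (fun x => x) false with hs
    set N := n.toNat with hNdef
    set L : Int := 2 ^ N with hLdef
    set f := cntP L (s.take k.toNat) with hf
    have hkn : k.toNat ≤ s.length := by omega
    have hmono : ∀ i j : Int, 0 ≤ i → i ≤ j → j < (s.length : Int) → pvVal s i ≤ pvVal s j :=
      mono_of_pairwise s (PySem.List.sorted_pairwise A (fun x => x))
    have hknc : ((k.toNat : Nat) : Int) = k := Int.toNat_of_nonneg hk0
    -- A's side
    have hA : problema_2 n k C1 C2 A = Sfn C1 C2 f N 1 := by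
      simp only [problema_2, if_neg hk]
      rw [← hs]
      rw [show (2 : Int) ^ n.toNat = 1 + 2^N - 1 by rw [hNdef]; ring]
      exact deciderA_eq_Sfn C1 C2 s k.toNat L hkn hmono N (n.toNat + 1) 1 0 (k-1)
        (by omega) le_rfl (by omega) le_rfl (by omega) (by omega)
        (fun j hj1 hj2 => (by omega : False).elim)
        (fun j hj1 hj2 => by simp only [clampI]; omega)
        (fun j hj1 hj2 => (by omega : False).elim)
    -- B's side
    have hfpos : ∀ j, 0 ≤ f j := by
      intro j
      rw [hf]
      unfold cntP
      positivity
    have hNcast : ((2 ^ N : Nat) : Int) = L := by rw [hLdef]; push_cast; ring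
    set ys := (s.take k.toNat).map (fun p => min (max p 1) L - 1) with hys
    have hfold : (s.take k.toNat).foldl (fun runs p => rleStep L runs p) []
        = List.foldl rleStep' [] ys := by
      rw [hys, List.foldl_map]
      rfl
    have hsorted_ys : ys.Pairwise (· ≤ ·) :=
      List.Pairwise.map _ (fun a b (hab : a ≤ b) => by omega)
        (List.Pairwise.sublist (List.take_sublist _ _) (PySem.List.sorted_pairwise A (fun x => x)))
    have hbnd : ∀ y ∈ ys, ((0 : Nat) : Int) ≤ y ∧ y < ((0 : Nat) : Int) + ((2 ^ N : Nat) : Int) := by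
      intro y hy
      rw [hys, List.mem_map] at hy
      obtain ⟨p, _, rfl⟩ := hy
      rw [hNcast]
      simp only [Nat.cast_zero, zero_add]
      omega
    have hg : ∀ j : Nat, f (1 + (j : Int)) = ((ys.countP (fun y => y = (j : Int))) : Int) := by
      intro j
      rw [hf]
      unfold cntP
      rw [hys, List.countP_map]
      congr 1
      apply List.countP_congr
      intro v _
      simp only [Function.comp_apply, clampI]
      simp only [decide_eq_true_eq]
      constructor <;> intro <;> omega
    have hrle := rle_spec (2 ^ N) 0 ys hsorted_ys hbnd
    have htot : ssum f (1 + ((0 : Nat) : Int) * 2 ^ N) (2 ^ N) = (k.toNat : Int) := by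
      rw [hf, Nat.cast_zero, zero_mul, add_zero]
      rw [ssum_cntP L (s.take k.toNat) 1 (2 ^ N)]
      have hall : (s.take k.toNat).countP
          (fun v => decide (1 ≤ clampI L v ∧ clampI L v ≤ 1 + ((2 ^ N : Nat) : Int) - 1))
          = (s.take k.toNat).length :=
        List.countP_eq_length.mpr (fun v _ => by
          rw [hNcast]
          simp only [clampI, decide_eq_true_eq]
          omega)
      rw [hall, List.length_take]
      congr 1
      omega
    have hktpos : ¬ ((k.toNat : Int) = 0) := by omega
    have hlast : lvl C1 C2 f N 0 1
        = [(((0 : Nat) : Int), ssum f (1 + ((0 : Nat) : Int) * 2 ^ N) (2 ^ N),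
            Sfn C1 C2 f N (1 + ((0 : Nat) : Int) * 2 ^ N))] := by
      rw [lvl, lvl, if_neg (by rw [htot]; exact hktpos), List.append_nil]
    have hB : problema_2_alt n k C1 C2 A = Sfn C1 C2 f N 1 := by
      simp only [problema_2_alt, if_neg hk]
      have hloop := loopB_lvl C1 C2 f hfpos N 0
      rw [show Et C1 0 = C1 from rfl, show ((2 : Int) ^ 0) = 1 by norm_num, zero_add] at hloop
      rw [← hs, PySem.List.slice_to s hk0, ← hNdef, ← hLdef, hfold, hrle,
          rleL_map_lvl C1 C2 f _ hg (2 ^ N) 0, hloop, hlast]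
      simp
    rw [hA, hB]
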